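-- pv_equiv track=rewrite | github.com/alxgom/anki-catala | card_helpers.py | sl
-- ===== SOURCE A (Python) =====
-- def sl(word: str, positions: list[int]) -> str:
--     """
--     Mark silent letters (lletra muda) in a word.
--     Wraps characters at given positions with <span class="sl">.
--
--     Usage:
--         sl("temps", [3])  → 'tem<span class="sl">p</span>s'
--     """
--     chars = list(word)
--     result = []
--     for i, ch in enumerate(chars):
--         if i in positions:
--             result.append(f'<span class="sl">{ch}</span>')
--         else:
--             result.append(ch)
--     return "".join(result)
-- ===== SOURCE B (Python) =====
-- def sl(word: str, positions: list[int]) -> str: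
--     """Cursor walk over the sorted set of in-range positions instead of a per-character membership scan."""
--     marked = sorted(set(p for p in positions if 0 <= p < len(word)))
--     parts = []
--     prev = 0
--     for p in marked:
--         parts.append(word[prev:p])
--         parts.append('<span class="sl">' + word[p] + '</span>')
--         prev = p + 1
--     parts.append(word[prev:])
--     return "".join(parts)
-- ===== Notes on version B (the rewrite author's own statement) =====
-- stated objective: faster
-- what changed: Instead of scanning the whole positions list for every character (i in positions per index), B sorts the set of in-range positions once and emits the string in one cursor walk: unmarked slice, wrapped character, advance cursor.
import Mathlib
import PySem

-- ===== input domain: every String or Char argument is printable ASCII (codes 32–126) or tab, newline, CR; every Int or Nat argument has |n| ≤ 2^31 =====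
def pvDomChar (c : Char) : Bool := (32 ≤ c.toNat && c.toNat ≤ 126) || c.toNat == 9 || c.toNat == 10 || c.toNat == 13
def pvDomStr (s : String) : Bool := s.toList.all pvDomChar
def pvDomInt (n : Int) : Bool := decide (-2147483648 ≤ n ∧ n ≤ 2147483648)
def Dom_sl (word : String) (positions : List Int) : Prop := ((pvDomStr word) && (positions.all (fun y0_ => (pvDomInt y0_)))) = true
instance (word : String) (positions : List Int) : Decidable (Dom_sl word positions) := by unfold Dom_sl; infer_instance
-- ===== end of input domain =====

-- B replaces A's per-character membership scan of `positions` by one cursor walk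
-- over the sorted set of in-range positions (objective: faster; measured).

-- ===== PORT A =====
-- f'<span class="sl">{ch}</span>'
def slWrapA (ch : Char) : String :=
  String.ofList ("<span class=\"sl\">".toList ++ [ch] ++ "</span>".toList)

def sl (word : String) (positions : List Int) : String :=
  let chars := word.toList
  let result := (PySem.List.enumerate chars 0).foldl
    (fun (acc : List String) p =>
      if positions.contains p.1 then acc ++ [slWrapA p.2]
      else acc ++ [String.ofList [p.2]]) []
  PySem.Str.join "" result

-- ===== PORT B =====
-- '<span class="sl">' + ch + '</span>'
def slWrapB (ch : Char) : String :=
  String.ofList ("<span class=\"sl\">".toList ++ [ch] ++ "</span>".toList)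

def sl_alt (word : String) (positions : List Int) : String :=
  let n : Int := PySem.Str.len word
  let marked := PySem.List.sorted
    (PySem.Set.ofList (positions.filter (fun p => decide (0 ≤ p) && decide (p < n))))
    (fun x => x) false
  let st := marked.foldl
    (fun (st : List String × Int) p =>
      (st.1 ++ [PySem.Str.slice word (some st.2) (some p),
                -- word[p]: p is in range by the filter above, so the total pyGetD is exact here
                slWrapB (PySem.List.pyGetD word.toList p ' ')], p + 1))
    ([], 0)
  PySem.Str.join "" (st.1 ++ [PySem.Str.slice word (some st.2) none])

-- ===== PRECONDITION & SPEC =====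
def Spec_sl (word : String) (positions : List Int) (out : String) : Prop := out = sl_alt word positions
instance (word : String) (positions : List Int) (out : String) : Decidable (Spec_sl word positions out) := by unfold Spec_sl; infer_instance

-- ===== CLAIM (what is proved, stated in full; the proofs are below) =====
def Claim_equal_sl : Prop := ∀ (word : String) (positions : List Int), Dom_sl word positions → Spec_sl word positions (sl word positions)

-- ===== LEMMAS AND PROOFS =====

-- char-level picture of the wrapped span
def wchars (ch : Char) : List Char :=
  "<span class=\"sl\">".toList ++ [ch] ++ "</span>".toList

def pieceFn (positions : List Int) (p : Int × Char) : List Char :=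
  if positions.contains p.1 then wchars p.2 else [p.2]

-- A's output on a char list, starting index s
def aTail (positions : List Int) (cs : List Char) (s : Int) : List Char :=
  (PySem.List.enumerate cs s).flatMap (pieceFn positions)

-- B's cursor walk on a char list
def bCore (cs : List Char) (prev : Int) : List Int → List Char
  | [] => PySem.List.slice cs (some prev) none
  | p :: rest =>
      PySem.List.slice cs (some prev) (some p) ++ wchars (PySem.List.pyGetD cs p ' ')
        ++ bCore cs (p + 1) rest

theorem join_nil_flatten (ls : List (List Char)) : PySem.Chars.join [] ls = ls.flatten := by
  induction ls with
  | nil => simp [PySem.Chars.join_nil]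
  | cons a t ih =>
      cases t with
      | nil => simp [PySem.Chars.join_singleton]
      | cons b r => simp [PySem.Chars.join_cons_cons, ih]

theorem foldl_push {α β : Type} (c : α → Bool) (f g : α → β) (l : List α) (init : List β) :
    l.foldl (fun acc p => if c p then acc ++ [f p] else acc ++ [g p]) init
      = init ++ l.map (fun p => if c p then f p else g p) := by
  induction l generalizing init with
  | nil => simp
  | cons a t ih => by_cases h : c a <;> simp [h, ih]

theorem aTail_append (positions : List Int) (xs ys : List Char) (s : Int) :
    aTail positions (xs ++ ys) s = aTail positions xs s ++ aTail positions ys (s + xs.length) := by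
  simp [aTail, PySem.List.enumerate_append]

theorem aTail_unmarked (positions : List Int) (l : List Char) (s : Int)
    (h : ∀ q : Int, s ≤ q → q < s + l.length → ¬ q ∈ positions) :
    aTail positions l s = l := by
  induction l generalizing s with
  | nil => simp [aTail]
  | cons a t ih =>
      have hs : ¬ (s ∈ positions) :=
        h s le_rfl (by simp only [List.length_cons]; push_cast; omega)
      have ht := ih (s + 1) (fun q h1 h2 => h q (by omega)
        (by simp only [List.length_cons] at h2 ⊢; push_cast at h2 ⊢; omega))
      simp [aTail, PySem.List.enumerate_cons, pieceFn, hs] at ht ⊢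
      exact ht

theorem sl_toList (word : String) (positions : List Int) :
    (sl word positions).toList = aTail positions word.toList 0 := by
  rw [show sl word positions = PySem.Str.join ""
    ((PySem.List.enumerate word.toList 0).foldl
      (fun (acc : List String) p =>
        if positions.contains p.1 then acc ++ [slWrapA p.2]
        else acc ++ [String.ofList [p.2]]) []) from rfl]
  have hf := foldl_push (fun p : Int × Char => positions.contains p.1)
      (fun p => slWrapA p.2) (fun p => String.ofList [p.2])
      (PySem.List.enumerate word.toList 0) []
  rw [hf]
  rw [PySem.Str.toList_join]
  simp only [List.nil_append, List.map_map]
  rw [show ("" : String).toList = [] from rfl, join_nil_flatten]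
  simp only [aTail, List.flatMap]
  congr 1
  refine List.map_congr_left ?_
  intro p _
  simp only [Function.comp_apply, pieceFn, slWrapA, wchars]
  split <;> simp

-- B's foldl, flattened, is bCore
theorem bFold_flatten (word : String) (ms : List Int) (parts : List String) (prev : Int) :
    PySem.Chars.join []
      (((ms.foldl
        (fun (st : List String × Int) p =>
          (st.1 ++ [PySem.Str.slice word (some st.2) (some p),
                    slWrapB (PySem.List.pyGetD word.toList p ' ')], p + 1))
        (parts, prev)).1 ++ [PySem.Str.slice word (some (ms.foldl
        (fun (st : List String × Int) p =>
          (st.1 ++ [PySem.Str.slice word (some st.2) (some p),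
                    slWrapB (PySem.List.pyGetD word.toList p ' ')], p + 1))
        (parts, prev)).2) none]).map String.toList)
      = (parts.map String.toList).flatten ++ bCore word.toList prev ms := by
  induction ms generalizing parts prev with
  | nil =>
      simp [join_nil_flatten, bCore, PySem.Str.toList_slice,
        PySem.Chars.slice_eq_listSlice]
  | cons p rest ih =>
      simp only [List.foldl_cons]
      rw [ih]
      simp [bCore, PySem.Str.toList_slice, PySem.Chars.slice_eq_listSlice,
        slWrapB, wchars, String.toList_ofList]

theorem sl_alt_toList (word : String) (positions : List Int) :
    (sl_alt word positions).toList
      = bCore word.toList 0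
          (PySem.List.sorted
            (PySem.Set.ofList (positions.filter
              (fun p => decide (0 ≤ p) && decide (p < PySem.Str.len word))))
            (fun x => x) false) := by
  unfold sl_alt
  rw [PySem.Str.toList_join]
  rw [show ("" : String).toList = [] from rfl]
  rw [bFold_flatten]
  simp

-- the heart: a cursor walk over the sorted marked positions equals A's scan
theorem bCore_eq_aTail (positions : List Int) (cs : List Char) (ms : List Int) (k : Nat)
    (hk : k ≤ cs.length)
    (hsort : ms.Pairwise (· < ·))
    (hmem : ∀ q : Int, q ∈ ms ↔ ((k : Int) ≤ q ∧ q < cs.length ∧ q ∈ positions)) :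
    bCore cs (k : Int) ms = aTail positions (cs.drop k) (k : Int) := by
  induction ms generalizing k with
  | nil =>
      rw [bCore, PySem.List.slice_from_natCast]
      refine (aTail_unmarked positions _ _ ?_).symm
      intro q h1 h2 hq
      have := (hmem q).mpr ⟨h1, by simp at h2; omega, hq⟩
      simp at this
  | cons p rest ih =>
      have hp := (hmem p).mp (List.mem_cons_self ..)
      obtain ⟨hp1, hp2, hp3⟩ := hp
      obtain ⟨pn, rfl⟩ : ∃ pn : Nat, p = (pn : Int) :=
        ⟨p.toNat, (Int.toNat_of_nonneg (by omega)).symm⟩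
      have hpn1 : k ≤ pn := by exact_mod_cast hp1
      have hpn2 : pn < cs.length := by exact_mod_cast hp2
      -- split the suffix at pn
      have hsplit : cs.drop k
          = (cs.drop k).take (pn - k) ++ [cs[pn]] ++ cs.drop (pn + 1) := by
        rw [List.append_assoc]
        conv_lhs => rw [← List.take_append_drop (pn - k) (cs.drop k)]
        congr 1
        rw [List.drop_drop, show k + (pn - k) = pn by omega,
          List.drop_eq_getElem_cons hpn2]
        simp
      rw [bCore, PySem.List.slice_natCast, PySem.List.pyGetD_natCast]
      conv_rhs => rw [hsplit]
      rw [aTail_append, aTail_append]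
      have hlen1 : ((cs.drop k).take (pn - k)).length = pn - k := by
        simp [List.length_take, List.length_drop]; omega
      have hcast : ((k : Int) + ((cs.drop k).take (pn - k)).length) = (pn : Int) := by
        rw [hlen1]; omega
      have hcast2 : ((k : Int) + ((cs.drop k).take (pn - k) ++ [cs[pn]]).length)
          = (pn : Int) + 1 := by
        simp only [List.length_append, List.length_cons, List.length_nil, hlen1]
        push_cast; omega
      rw [hcast, hcast2]
      have h1 : aTail positions ((cs.drop k).take (pn - k)) (k : Int)
          = (cs.drop k).take (pn - k) := by
        refine aTail_unmarked positions _ _ ?_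
        intro q hq1 hq2 hq3
        rw [hlen1] at hq2
        have hqms := (hmem q).mpr ⟨hq1, by omega, hq3⟩
        rcases List.mem_cons.mp hqms with h | h
        · rw [h] at hq2; omega
        · have := (List.pairwise_cons.mp hsort).1 q h
          omega
      have h2 : aTail positions [cs[pn]] (pn : Int) = wchars cs[pn] := by
        simp [aTail, PySem.List.enumerate_cons, pieceFn, hp3]
      have hmem' : ∀ q : Int, q ∈ rest ↔ (((pn + 1 : Nat) : Int) ≤ q ∧ q < cs.length ∧ q ∈ positions) := by
        intro q
        constructor
        · intro hq
          obtain ⟨a, b, c⟩ := (hmem q).mp (List.mem_cons_of_mem _ hq)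
          have hgt := (List.pairwise_cons.mp hsort).1 q hq
          exact ⟨by push_cast; omega, b, c⟩
        · rintro ⟨a, b, c⟩
          have hin : q ∈ ((pn : Int) :: rest) :=
            (hmem q).mpr ⟨by push_cast at a ⊢; omega, b, c⟩
          rcases List.mem_cons.mp hin with h | h
          · rw [h] at a; push_cast at a; omega
          · exact h
      have h3 := ih (pn + 1) (by omega) (List.pairwise_cons.mp hsort).2 hmem'
      push_cast at h3
      rw [h3, h1, h2]
      have hgd : cs.getD pn ' ' = cs[pn] := by
        simp [List.getD_eq_getElem?_getD, List.getElem?_eq_getElem hpn2]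
      rw [hgd]

-- ===== VERDICT (by name: the statement is the Claim_ definition above) =====
theorem sl_spec : Claim_equal_sl := by
  intro word positions _
  unfold Spec_sl
  rw [← String.toList_inj]
  rw [sl_toList, sl_alt_toList]
  set ms := PySem.List.sorted
      (PySem.Set.ofList (positions.filter
        (fun p => decide (0 ≤ p) && decide (p < PySem.Str.len word))))
      (fun x => x) false with hms
  have hsort : ms.Pairwise (· < ·) := PySem.List.sorted_ofList_pairwise_lt _
  have hmem : ∀ q : Int, q ∈ ms ↔ ((0 : Int) ≤ q ∧ q < word.toList.length ∧ q ∈ positions) := by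
    intro q
    rw [hms, PySem.List.mem_sorted, PySem.Set.mem_ofList, List.mem_filter]
    simp [PySem.Str.len_eq, and_comm, and_left_comm]
  have := bCore_eq_aTail positions word.toList ms 0 (by omega) hsort (by exact_mod_cast hmem)
  simp at this
  rw [this]
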